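-- pv_equiv track=rewrite | github.com/PheeZz/Algorythms-and-structure-of-data | Lab_16_PackingTask/main.py | inNsystem
-- ===== SOURCE A (Python) =====
-- def inNsystem(index, boxes, item_count):
--     res = []
--     while index > 0:
--         res.append(index % boxes)
--         index = index // boxes
--     res.reverse()
--     for _ in range(item_count - len(res)):
--         res.insert(0, 0)  # дополняем массив нулями до количества предметов
--     return res
-- ===== SOURCE B (Python) =====
-- def _digits(n, b):
--     # most-significant-first digits of n in base b (same divmod chain as the task)
--     return [] if n <= 0 else _digits(n // b, b) + [n % b]
--
-- def inNsystem(index, boxes, item_count):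
--     digits = _digits(index, boxes)
--     return [0] * (item_count - len(digits)) + digits
-- ===== Notes on version B (the rewrite author's own statement) =====
-- stated objective: faster
-- what changed: Replaces the append/reverse loop and the quadratic insert(0,0) padding loop with a recursive helper emitting digits most-significant-first and a single [0]*k front padding (linear).
import Mathlib
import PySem

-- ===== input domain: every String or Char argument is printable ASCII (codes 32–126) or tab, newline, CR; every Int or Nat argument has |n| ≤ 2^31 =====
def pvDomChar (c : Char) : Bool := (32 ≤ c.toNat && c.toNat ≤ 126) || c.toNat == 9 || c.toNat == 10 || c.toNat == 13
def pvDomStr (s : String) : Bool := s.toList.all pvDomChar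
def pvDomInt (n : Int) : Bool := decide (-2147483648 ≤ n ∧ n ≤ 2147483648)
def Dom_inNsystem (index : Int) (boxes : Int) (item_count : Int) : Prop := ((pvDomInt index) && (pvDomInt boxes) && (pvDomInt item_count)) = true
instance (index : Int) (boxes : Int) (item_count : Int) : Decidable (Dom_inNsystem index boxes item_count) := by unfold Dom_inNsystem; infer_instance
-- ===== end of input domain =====

-- ===== PORT A =====
-- while loop ported with fuel = index.toNat (enough iterations: index strictly
-- decreases each step for boxes ≥ 2 or boxes < 0; Pre_ excludes boxes ∈ {0,1} with index > 0,
-- where the Python raises ZeroDivisionError resp. loops forever)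
def inNsystemLoop (fuel : Nat) (index boxes : Int) (res : List Int) : List Int :=
  match fuel with
  | 0 => res
  | fuel + 1 =>
    if index > 0 then
      inNsystemLoop fuel (PySem.Int.floordiv index boxes) boxes (res ++ [PySem.Int.mod index boxes])
    else res

def inNsystem (index : Int) (boxes : Int) (item_count : Int) : List Int :=
  let res := (inNsystemLoop (index.toNat + 1) index boxes []).reverse
  (PySem.List.pyRange 0 (item_count - res.length) 1).foldl
    (fun l _ => PySem.List.insert l 0 0) res

-- ===== PORT B =====
-- recursive helper, same fuel discipline
def digitsB (fuel : Nat) (n b : Int) : List Int :=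
  match fuel with
  | 0 => []
  | fuel + 1 =>
    if n ≤ 0 then [] else digitsB fuel (PySem.Int.floordiv n b) b ++ [PySem.Int.mod n b]

def inNsystem_alt (index : Int) (boxes : Int) (item_count : Int) : List Int :=
  let digits := digitsB (index.toNat + 1) index boxes
  List.replicate (item_count - digits.length).toNat 0 ++ digits

-- ===== PRECONDITION & SPEC =====
-- Pre_ excludes only inputs where the Python A does not return: boxes = 0 with index > 0
-- (ZeroDivisionError) and boxes = 1 with index > 0 (the while loop never terminates).
def Pre_inNsystem (index : Int) (boxes : Int) (item_count : Int) : Prop :=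
  index ≤ 0 ∨ boxes < 0 ∨ 2 ≤ boxes
instance (index : Int) (boxes : Int) (item_count : Int) : Decidable (Pre_inNsystem index boxes item_count) := by
  unfold Pre_inNsystem; infer_instance

def pvWitness_inNsystem : Int × Int × Int := (5, 2, 4)

def Spec_inNsystem (index : Int) (boxes : Int) (item_count : Int) (out : List Int) : Prop := out = inNsystem_alt index boxes item_count
instance (index : Int) (boxes : Int) (item_count : Int) (out : List Int) : Decidable (Spec_inNsystem index boxes item_count out) := by unfold Spec_inNsystem; infer_instance

-- ===== CLAIM (what is proved, stated in full; the proofs are below) =====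
def Claim_equal_inNsystem : Prop := ∀ (index : Int) (boxes : Int) (item_count : Int), Dom_inNsystem index boxes item_count → Pre_inNsystem index boxes item_count → Spec_inNsystem index boxes item_count (inNsystem index boxes item_count)

-- ===== LEMMAS AND PROOFS =====

theorem inNsystemLoop_eq_digitsB (fuel : Nat) : ∀ (n b : Int) (res : List Int),
    inNsystemLoop fuel n b res = res ++ (digitsB fuel n b).reverse := by
  induction fuel with
  | zero => intro n b res; simp [inNsystemLoop, digitsB]
  | succ fuel ih =>
    intro n b res
    by_cases h : n > 0
    · simp only [inNsystemLoop, digitsB, if_pos h, if_neg (by omega : ¬ n ≤ 0), ih]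
      simp
    · simp [inNsystemLoop, digitsB, h, (by omega : n ≤ 0)]

theorem foldl_insert_zero (ys : List Int) : ∀ (res : List Int),
    ys.foldl (fun l _ => PySem.List.insert l 0 0) res = List.replicate ys.length 0 ++ res := by
  induction ys with
  | nil => intro res; simp
  | cons y ys ih =>
    intro res
    simp only [List.foldl_cons, PySem.List.insert_zero, ih, List.length_cons,
      List.replicate_succ']
    simp

-- ===== VERDICT (by name: the statement is the Claim_ definition above) =====
theorem inNsystem_spec : Claim_equal_inNsystem := by
  intro index boxes item_count _ _
  unfold Spec_inNsystem inNsystem inNsystem_alt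
  simp only [inNsystemLoop_eq_digitsB, List.nil_append, List.reverse_reverse,
    foldl_insert_zero, PySem.List.length_pyRange_one, sub_zero]
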